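-- pv_equiv track=rewrite | github.com/Sablayrolles/evolving-algorithms | test_pygame.py | getFacesCases
-- ===== SOURCE A (Python) =====
-- def getFacesCases(posx, posy, direction, nbSide):
--     if direction == 1: #up
--         bloc_a_gauche = [(posx-i, posy-1) for i in reversed(range(1, nbSide))]
--         bloc_devant = [(posx, posy-1)]
--         bloc_a_droite = [(posx+i, posy-1) for i in range(1, nbSide)]
--     if direction == 2: #right
--         bloc_a_gauche = [(posx+1, posy-i) for i in reversed(range(1, nbSide))]
--         bloc_devant = [(posx+1, posy)]
--         bloc_a_droite = [(posx+1, posy+i) for i in range(1, nbSide)]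
--     if direction == 3: #down
--         bloc_a_gauche = [(posx+i, posy+1) for i in reversed(range(1, nbSide))]
--         bloc_devant = [(posx, posy+1)]
--         bloc_a_droite = [(posx-i, posy+1) for i in range(1, nbSide)]
--     if direction == 4: #left
--         bloc_a_gauche = [(posx-1, posy+i) for i in reversed(range(1,nbSide))]
--         bloc_devant = [(posx-1, posy)]
--         bloc_a_droite = [(posx-1, posy-i) for i in range(1,nbSide)]
--
--     bloc = bloc_a_gauche
--     bloc.extend(bloc_devant)
--     bloc.extend(bloc_a_droite)
--
--     return list(bloc)
-- ===== SOURCE B (Python) =====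
-- def getFacesCases(posx, posy, direction, nbSide):
--     if direction not in (1, 2, 3, 4):
--         raise ValueError("invalid direction")
--     # build only the canonical 'up' row, wrapping outward around the front cell
--     cells = [(posx, posy - 1)]
--     for k in range(1, nbSide):
--         cells = [(posx - k, posy - 1)] + cells + [(posx + k, posy - 1)]
--     # rotate the row 90 degrees clockwise about (posx, posy), direction-1 times
--     for _ in range(direction - 1):
--         cells = [(posx - (y - posy), posy + (x - posx)) for (x, y) in cells]
--     return cells
-- ===== Notes on version B (the rewrite author's own statement) =====
-- stated objective: alternative
-- what changed: B builds only the canonical 'up' row by wrapping cells outward around the front cell, then rotates the whole row 90 degrees clockwise about (posx, posy) direction-1 times, instead of A's four hand-written per-direction triples of comprehensions.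
import Mathlib
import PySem

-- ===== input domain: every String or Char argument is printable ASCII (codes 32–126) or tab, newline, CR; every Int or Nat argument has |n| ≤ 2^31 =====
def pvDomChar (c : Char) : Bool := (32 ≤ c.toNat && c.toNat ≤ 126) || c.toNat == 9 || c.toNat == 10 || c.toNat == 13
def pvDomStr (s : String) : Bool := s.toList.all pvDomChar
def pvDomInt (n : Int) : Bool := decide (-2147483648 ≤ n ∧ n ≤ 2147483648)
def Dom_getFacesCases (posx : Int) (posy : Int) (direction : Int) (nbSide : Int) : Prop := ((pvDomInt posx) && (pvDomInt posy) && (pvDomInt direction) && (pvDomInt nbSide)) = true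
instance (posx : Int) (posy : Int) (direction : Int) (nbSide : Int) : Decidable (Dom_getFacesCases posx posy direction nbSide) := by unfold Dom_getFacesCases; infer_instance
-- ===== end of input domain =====

-- B builds only the canonical 'up' row by wrapping outward around the front cell and then
-- rotates it 90° clockwise (direction-1) times about (posx, posy); objective: alternative algorithm, same cost.


-- ===== PORT A =====
-- literal transliteration of A: three lists per direction, then concatenated.
-- For direction ∉ {1,2,3,4} Python raises UnboundLocalError (excluded by Pre_): the port returns [].
def getFacesCases (posx : Int) (posy : Int) (direction : Int) (nbSide : Int) : List (Int × Int) :=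
  if direction = 1 then
    ((PySem.List.pyRange 1 nbSide 1).reverse).map (fun i => (posx - i, posy - 1))
      ++ [(posx, posy - 1)]
      ++ (PySem.List.pyRange 1 nbSide 1).map (fun i => (posx + i, posy - 1))
  else if direction = 2 then
    ((PySem.List.pyRange 1 nbSide 1).reverse).map (fun i => (posx + 1, posy - i))
      ++ [(posx + 1, posy)]
      ++ (PySem.List.pyRange 1 nbSide 1).map (fun i => (posx + 1, posy + i))
  else if direction = 3 then
    ((PySem.List.pyRange 1 nbSide 1).reverse).map (fun i => (posx + i, posy + 1))
      ++ [(posx, posy + 1)]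
      ++ (PySem.List.pyRange 1 nbSide 1).map (fun i => (posx - i, posy + 1))
  else if direction = 4 then
    ((PySem.List.pyRange 1 nbSide 1).reverse).map (fun i => (posx - 1, posy + i))
      ++ [(posx - 1, posy)]
      ++ (PySem.List.pyRange 1 nbSide 1).map (fun i => (posx - 1, posy - i))
  else []

-- ===== PORT B =====
-- transliteration of Source B: wrap the 'up' row outward, then rotate it direction-1 times.
-- For direction ∉ {1,2,3,4} Source B raises ValueError (excluded by Pre_): the port returns [].
def pvRot (posx : Int) (posy : Int) (p : Int × Int) : Int × Int :=
  (posx - (p.2 - posy), posy + (p.1 - posx))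

def getFacesCases_alt (posx : Int) (posy : Int) (direction : Int) (nbSide : Int) : List (Int × Int) :=
  if direction = 1 ∨ direction = 2 ∨ direction = 3 ∨ direction = 4 then
    -- cells = [(posx, posy-1)]; for k in range(1, nbSide): cells = [left] + cells + [right]
    let cells := (PySem.List.pyRange 1 nbSide 1).foldl
      (fun cs k => (posx - k, posy - 1) :: (cs ++ [(posx + k, posy - 1)]))
      [(posx, posy - 1)]
    -- for _ in range(direction - 1): cells = [rot(c) for c in cells]
    (List.map (pvRot posx posy))^[(direction - 1).toNat] cells
  else []

-- ===== PRECONDITION & SPEC =====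
-- Pre_ excludes exactly the directions on which A raises UnboundLocalError (and B ValueError).
def Pre_getFacesCases (posx : Int) (posy : Int) (direction : Int) (nbSide : Int) : Prop :=
  direction = 1 ∨ direction = 2 ∨ direction = 3 ∨ direction = 4
instance (posx : Int) (posy : Int) (direction : Int) (nbSide : Int) : Decidable (Pre_getFacesCases posx posy direction nbSide) := by unfold Pre_getFacesCases; infer_instance
def pvWitness_getFacesCases : Int × Int × Int × Int := (0, 0, 1, 3)

def Spec_getFacesCases (posx : Int) (posy : Int) (direction : Int) (nbSide : Int) (out : List (Int × Int)) : Prop := out = getFacesCases_alt posx posy direction nbSide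
instance (posx : Int) (posy : Int) (direction : Int) (nbSide : Int) (out : List (Int × Int)) : Decidable (Spec_getFacesCases posx posy direction nbSide out) := by unfold Spec_getFacesCases; infer_instance

-- ===== CLAIM =====
def Claim_equal_getFacesCases : Prop := ∀ (posx : Int) (posy : Int) (direction : Int) (nbSide : Int), Dom_getFacesCases posx posy direction nbSide → Pre_getFacesCases posx posy direction nbSide → Spec_getFacesCases posx posy direction nbSide (getFacesCases posx posy direction nbSide)

-- ===== LEMMAS AND PROOFS =====

-- The outward-wrapping fold produces exactly A's direction-1 row.
theorem pv_wrap_aux (posx posy : Int) (m : Nat) :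
    (PySem.List.pyRange 1 (1 + (m : Int)) 1).foldl
      (fun cs k => (posx - k, posy - 1) :: (cs ++ [(posx + k, posy - 1)]))
      [(posx, posy - 1)]
    = ((PySem.List.pyRange 1 (1 + (m : Int)) 1).reverse).map (fun i => (posx - i, posy - 1))
        ++ [(posx, posy - 1)]
        ++ (PySem.List.pyRange 1 (1 + (m : Int)) 1).map (fun i => (posx + i, posy - 1)) := by
  induction m with
  | zero =>
      simp only [Nat.cast_zero, add_zero]
      rw [show PySem.List.pyRange (1:Int) 1 1 = [] from by decide]
      simp
  | succ k ih =>
      rw [show (1 + ((k+1 : Nat) : Int)) = (1 + (k : Int)) + 1 from by push_cast; ring,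
        PySem.List.pyRange_one_succ_right (show (1:Int) ≤ 1 + (k : Int) by omega),
        List.foldl_append, ih]
      simp [List.append_assoc]

theorem pv_wrap (posx posy n : Int) :
    (PySem.List.pyRange 1 n 1).foldl
      (fun cs k => (posx - k, posy - 1) :: (cs ++ [(posx + k, posy - 1)]))
      [(posx, posy - 1)]
    = ((PySem.List.pyRange 1 n 1).reverse).map (fun i => (posx - i, posy - 1))
        ++ [(posx, posy - 1)]
        ++ (PySem.List.pyRange 1 n 1).map (fun i => (posx + i, posy - 1)) := by
  rcases le_or_gt n 1 with h | h
  · rw [PySem.List.pyRange_one_eq_nil h]; simp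
  · obtain ⟨m, hm⟩ : ∃ m : Nat, n = 1 + (m : Int) := ⟨(n - 1).toNat, by omega⟩
    subst hm; exact pv_wrap_aux posx posy m

-- Rotating the row for direction d gives the row for direction d+1.
theorem pv_rot1 (posx posy nbSide : Int) :
    List.map (pvRot posx posy)
      (((PySem.List.pyRange 1 nbSide 1).reverse).map (fun i => (posx - i, posy - 1))
        ++ [(posx, posy - 1)]
        ++ (PySem.List.pyRange 1 nbSide 1).map (fun i => (posx + i, posy - 1)))
    = ((PySem.List.pyRange 1 nbSide 1).reverse).map (fun i => (posx + 1, posy - i))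
        ++ [(posx + 1, posy)]
        ++ (PySem.List.pyRange 1 nbSide 1).map (fun i => (posx + 1, posy + i)) := by
  simp only [List.map_append, List.map_map, List.map_cons, List.map_nil]
  refine congrArg₂ _ (congrArg₂ _ ?_ ?_) ?_
  · apply List.map_congr_left; intro i _
    simp only [Function.comp, pvRot, Prod.mk.injEq]; constructor <;> ring
  · simp only [pvRot, Prod.mk.injEq, List.cons.injEq, and_true]; constructor <;> ring
  · apply List.map_congr_left; intro i _
    simp only [Function.comp, pvRot, Prod.mk.injEq]; constructor <;> ring

theorem pv_rot2 (posx posy nbSide : Int) :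
    List.map (pvRot posx posy)
      (((PySem.List.pyRange 1 nbSide 1).reverse).map (fun i => (posx + 1, posy - i))
        ++ [(posx + 1, posy)]
        ++ (PySem.List.pyRange 1 nbSide 1).map (fun i => (posx + 1, posy + i)))
    = ((PySem.List.pyRange 1 nbSide 1).reverse).map (fun i => (posx + i, posy + 1))
        ++ [(posx, posy + 1)]
        ++ (PySem.List.pyRange 1 nbSide 1).map (fun i => (posx - i, posy + 1)) := by
  simp only [List.map_append, List.map_map, List.map_cons, List.map_nil]
  refine congrArg₂ _ (congrArg₂ _ ?_ ?_) ?_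
  · apply List.map_congr_left; intro i _
    simp only [Function.comp, pvRot, Prod.mk.injEq]; constructor <;> ring
  · simp only [pvRot, Prod.mk.injEq, List.cons.injEq, and_true]; constructor <;> ring
  · apply List.map_congr_left; intro i _
    simp only [Function.comp, pvRot, Prod.mk.injEq]; constructor <;> ring

theorem pv_rot3 (posx posy nbSide : Int) :
    List.map (pvRot posx posy)
      (((PySem.List.pyRange 1 nbSide 1).reverse).map (fun i => (posx + i, posy + 1))
        ++ [(posx, posy + 1)]
        ++ (PySem.List.pyRange 1 nbSide 1).map (fun i => (posx - i, posy + 1)))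
    = ((PySem.List.pyRange 1 nbSide 1).reverse).map (fun i => (posx - 1, posy + i))
        ++ [(posx - 1, posy)]
        ++ (PySem.List.pyRange 1 nbSide 1).map (fun i => (posx - 1, posy - i)) := by
  simp only [List.map_append, List.map_map, List.map_cons, List.map_nil]
  refine congrArg₂ _ (congrArg₂ _ ?_ ?_) ?_
  · apply List.map_congr_left; intro i _
    simp only [Function.comp, pvRot, Prod.mk.injEq]; constructor <;> ring
  · simp only [pvRot, Prod.mk.injEq, List.cons.injEq, and_true]; constructor <;> ring
  · apply List.map_congr_left; intro i _
    simp only [Function.comp, pvRot, Prod.mk.injEq]; constructor <;> ring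

-- ===== VERDICT =====
theorem getFacesCases_spec : Claim_equal_getFacesCases := by
  intro posx posy direction nbSide _ hpre
  unfold Spec_getFacesCases getFacesCases getFacesCases_alt
  rcases hpre with h | h | h | h <;> subst h
  · rw [if_pos rfl, if_pos (Or.inl rfl)]
    simp only [show ((1:Int) - 1).toNat = 0 from rfl, Function.iterate_zero_apply]
    exact (pv_wrap posx posy nbSide).symm
  · rw [if_neg (by norm_num), if_pos rfl, if_pos (by norm_num)]
    simp only [show ((2:Int) - 1).toNat = 1 from rfl, Function.iterate_one]
    rw [pv_wrap, pv_rot1]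
  · rw [if_neg (by norm_num), if_neg (by norm_num), if_pos rfl, if_pos (by norm_num)]
    simp only [show ((3:Int) - 1).toNat = 0 + 1 + 1 from rfl, Function.iterate_succ_apply',
      Function.iterate_zero_apply]
    rw [pv_wrap, pv_rot1, pv_rot2]
  · rw [if_neg (by norm_num), if_neg (by norm_num), if_neg (by norm_num), if_pos rfl,
      if_pos (by norm_num)]
    simp only [show ((4:Int) - 1).toNat = 0 + 1 + 1 + 1 from rfl, Function.iterate_succ_apply',
      Function.iterate_zero_apply]
    rw [pv_wrap, pv_rot1, pv_rot2, pv_rot3]
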